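-- pv_equiv track=rewrite | github.com/pypi-data/pypi-mirror-367 | packages/loggissimo/loggissimo-1.0.7.tar.gz/loggissimo-1.0.7/loggissimo/_utils.py | get_module_combinations
-- ===== SOURCE A (Python) =====
-- from typing import List
--
-- def get_module_combinations(input_string: str) -> List[str]:
--     words = input_string.split(".")
--     combinations = []
--     current = ""
--     for word in words:
--         if current:
--             current += "."
--         current += word
--         combinations.append(current)
--     return combinations
-- ===== SOURCE B (Python) =====
-- def get_module_combinations(input_string):
--     words = input_string.split(".")
--     result = []
--     for i in range(len(words)):
--         result.append(".".join(words[:i + 1]))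
--     return result
-- ===== Notes on version B (the rewrite author's own statement) =====
-- stated objective: simpler
-- what changed: Drops the running accumulator with its conditional dot-insertion; each prefix is computed independently as '.'.join(words[:i+1]) in a loop over indices.
-- intended difference: On strings starting with '.', A's 'if current' guard silently drops the leading dots (A('.a') == ['', 'a']), while B returns the true dotted prefixes of the input (['', '.a']), which is the intended meaning of cumulative module-name prefixes. — e.g. on get_module_combinations(".a"): A returns ["", "a"], B returns ["", ".a"]
import Mathlib
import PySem

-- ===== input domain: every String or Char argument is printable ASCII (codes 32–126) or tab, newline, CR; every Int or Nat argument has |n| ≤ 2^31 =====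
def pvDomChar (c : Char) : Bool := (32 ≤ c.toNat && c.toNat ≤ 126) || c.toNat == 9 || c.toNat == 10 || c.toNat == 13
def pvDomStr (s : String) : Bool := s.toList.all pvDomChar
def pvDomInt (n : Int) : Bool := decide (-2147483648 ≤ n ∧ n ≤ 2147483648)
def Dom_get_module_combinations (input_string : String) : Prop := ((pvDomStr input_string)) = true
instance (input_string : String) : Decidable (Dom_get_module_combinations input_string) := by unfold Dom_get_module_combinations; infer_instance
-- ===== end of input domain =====

-- B drops A's running accumulator and conditional dot-insertion; each prefix is computed
-- independently as '.'.join(words[:i+1]) over indices (simpler decomposition).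
-- On strings starting with '.', B's value differs from A's (see D_ below).

-- ===== PORT A =====
def get_module_combinations (input_string : String) : List String :=
  let words := (PySem.Str.split? input_string ".").getD []
  let st := words.foldl
    (fun (st : String × List String) (word : String) =>
      let current := (if st.1 ≠ "" then st.1 ++ "." else st.1) ++ word
      (current, st.2 ++ [current]))
    ("", [])
  st.2

-- ===== PORT B =====
def get_module_combinations_alt (input_string : String) : List String :=
  let words := (PySem.Str.split? input_string ".").getD []
  (List.range words.length).map (fun (i : Nat) =>
    PySem.Str.join "." (PySem.List.slice words none (some ((i : Int) + 1))))

-- ===== PRECONDITION & SPEC =====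
-- On strings starting with '.', A's 'if current' guard silently drops the leading dots
-- (A ".a" = ["", "a"]), while B returns the true dotted prefixes of the input
-- (["", ".a"]), which is the intended meaning of cumulative module-name prefixes.
def D_get_module_combinations (input_string : String) : Prop :=
  PySem.Str.startswith input_string "." = true
instance (input_string : String) : Decidable (D_get_module_combinations input_string) := by
  unfold D_get_module_combinations; infer_instance

def Spec_get_module_combinations (input_string : String) (out : List String) : Prop :=
  ¬ D_get_module_combinations input_string → out = get_module_combinations_alt input_string
instance (input_string : String) (out : List String) : Decidable (Spec_get_module_combinations input_string out) := by
  unfold Spec_get_module_combinations; infer_instance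

def pvDiffWitness_get_module_combinations : String := ".a"
def pvDiffWitnessOut_get_module_combinations : (List String) × (List String) :=
  (["", "a"], ["", ".a"])

-- ===== CLAIM (what is proved, stated in full; the proofs are below) =====
def Claim_unchanged_get_module_combinations : Prop :=
  ∀ (input_string : String), Dom_get_module_combinations input_string →
    Spec_get_module_combinations input_string (get_module_combinations input_string)
def Claim_changed_get_module_combinations : Prop :=
  Dom_get_module_combinations (pvDiffWitness_get_module_combinations) ∧
  D_get_module_combinations (pvDiffWitness_get_module_combinations) ∧
  get_module_combinations (pvDiffWitness_get_module_combinations) = pvDiffWitnessOut_get_module_combinations.1 ∧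
  get_module_combinations_alt (pvDiffWitness_get_module_combinations) = pvDiffWitnessOut_get_module_combinations.2 ∧
  pvDiffWitnessOut_get_module_combinations.1 ≠ pvDiffWitnessOut_get_module_combinations.2
def Claim_exact_get_module_combinations : Prop :=
  ∀ (input_string : String), Dom_get_module_combinations input_string →
    D_get_module_combinations input_string →
    get_module_combinations input_string ≠ get_module_combinations_alt input_string

-- ===== LEMMAS AND PROOFS =====

-- the sequence of 'current' values A appends, as a structural recursion
def pvCombos : String → List String → List String
  | _, [] => []
  | c, w :: ws =>
    let c' := (if c ≠ "" then c ++ "." else c) ++ w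
    c' :: pvCombos c' ws

theorem pv_append_ne_empty (s t : String) (h : s ≠ "") : s ++ t ≠ "" := by
  intro he
  apply h
  have h2 := congrArg String.toList he
  simp at h2
  exact String.toList_inj.mp (by simp [h2.1])

theorem pv_foldl_combos (ws : List String) (c : String) (acc : List String) :
    (ws.foldl
      (fun (st : String × List String) (word : String) =>
        let current := (if st.1 ≠ "" then st.1 ++ "." else st.1) ++ word
        (current, st.2 ++ [current]))
      (c, acc)).2 = acc ++ pvCombos c ws := by
  induction ws generalizing c acc with
  | nil => simp [pvCombos]
  | cons w ws ih =>
    simp only [List.foldl_cons, pvCombos]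
    rw [ih]
    simp

theorem pv_join_cons_append (x y : String) (l : List String) :
    PySem.Str.join "." ((x ++ y) :: l) = x ++ PySem.Str.join "." (y :: l) := by
  apply String.toList_inj.mp
  cases l with
  | nil =>
    simp [PySem.Str.toList_join, PySem.Chars.join_singleton]
  | cons p ps =>
    simp [PySem.Str.toList_join, PySem.Chars.join_cons_cons]

theorem pv_join_singleton (w : String) : PySem.Str.join "." [w] = w := by
  apply String.toList_inj.mp
  simp [PySem.Str.toList_join, PySem.Chars.join_singleton]

theorem pv_join_cons2 (x y : String) (l : List String) :
    PySem.Str.join "." (x :: y :: l) = x ++ "." ++ PySem.Str.join "." (y :: l) := by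
  apply String.toList_inj.mp
  simp [PySem.Str.toList_join, PySem.Chars.join_cons_cons]

theorem pv_combos_ne (ws : List String) (w : String) (hw : w ≠ "") :
    w :: pvCombos w ws =
      (List.range (ws.length + 1)).map
        (fun i => PySem.Str.join "." ((w :: ws).take (i + 1))) := by
  induction ws generalizing w with
  | nil =>
    simp [pvCombos, List.range_succ_eq_map, pv_join_singleton]
  | cons u us ih =>
    have hw' : w ++ "." ++ u ≠ "" := pv_append_ne_empty _ _ (pv_append_ne_empty _ _ hw)
    simp only [pvCombos, if_pos hw]
    rw [List.length_cons, List.range_succ_eq_map, List.map_cons]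
    congr 1
    · simp [pv_join_singleton]
    rw [List.map_map]
    have hih := ih (w ++ "." ++ u) hw'
    rw [hih]
    apply List.map_congr_left
    intro i _
    simp only [Function.comp_apply, Nat.succ_eq_add_one]
    rw [List.take_succ_cons, List.take_succ_cons, List.take_succ_cons,
      pv_join_cons_append (w ++ ".") u, pv_join_cons2]

-- the splitter's accumulator distributes out
theorem pv_go_acc (sep : List Char) (fuel : Nat) (l cur : List Char) (acc : List (List Char)) :
    PySem.Chars.splitOn.go sep fuel l cur acc =
      acc.reverse ++ PySem.Chars.splitOn.go sep fuel l cur [] := by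
  induction fuel generalizing l cur acc with
  | zero => simp [PySem.Chars.splitOn.go]
  | succ fuel ih =>
    cases l with
    | nil => simp [PySem.Chars.splitOn.go]
    | cons c rest =>
      simp only [PySem.Chars.splitOn.go]
      split_ifs with h
      · rw [ih, ih (List.drop sep.length (c :: rest)) [] [cur.reverse]]
        simp
      · exact ih rest (c :: cur) acc

-- the first emitted segment extends the pending chunk
theorem pv_go_head (sep : List Char) (fuel : Nat) (l cur : List Char) :
    ∃ t ts, PySem.Chars.splitOn.go sep fuel l cur [] = (cur.reverse ++ t) :: ts := by
  induction fuel generalizing l cur with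
  | zero => exact ⟨l, [], by simp [PySem.Chars.splitOn.go]⟩
  | succ fuel ih =>
    cases l with
    | nil => exact ⟨[], [], by simp [PySem.Chars.splitOn.go]⟩
    | cons c rest =>
      simp only [PySem.Chars.splitOn.go]
      split_ifs with h
      · refine ⟨[], PySem.Chars.splitOn.go sep fuel (List.drop sep.length (c :: rest)) [] [], ?_⟩
        rw [pv_go_acc]
        simp
      · obtain ⟨t, ts, ht⟩ := ih rest (c :: cur)
        refine ⟨c :: t, ts, ?_⟩
        rw [ht]
        simp

theorem pv_splitOn_head_ne (c : Char) (rest : List Char) (hc : c ≠ '.') :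
    ∃ t ts, PySem.Chars.splitOn (c :: rest) ['.'] = (c :: t) :: ts := by
  unfold PySem.Chars.splitOn
  simp only [List.length_cons, PySem.Chars.splitOn.go]
  have hpre : ['.'].isPrefixOf (c :: rest) = false := by
    simp [List.isPrefixOf, hc.symm]
  rw [hpre]
  simp only [Bool.false_eq_true, if_false]
  obtain ⟨t, ts, ht⟩ := pv_go_head ['.'] (rest.length + 1) rest [c]
  exact ⟨t, ts, by rw [ht]; simp⟩

theorem pv_splitOn_nil : PySem.Chars.splitOn [] ['.'] = [[]] := by
  simp [PySem.Chars.splitOn, PySem.Chars.splitOn.go]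

theorem pv_splitOn_cons_dot (rest : List Char) :
    PySem.Chars.splitOn ('.' :: rest) ['.'] = [] :: PySem.Chars.splitOn rest ['.'] := by
  unfold PySem.Chars.splitOn
  simp only [List.length_cons, PySem.Chars.splitOn.go]
  have hpre : ['.'].isPrefixOf ('.' :: rest) = true := by
    simp [List.isPrefixOf]
  rw [hpre]
  simp only [if_true]
  rw [pv_go_acc]
  simp

theorem pv_splitOn_ne_nil (l : List Char) : PySem.Chars.splitOn l ['.'] ≠ [] := by
  unfold PySem.Chars.splitOn
  obtain ⟨t, ts, ht⟩ := pv_go_head ['.'] (l.length + 1) l []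
  rw [ht]
  simp

-- the String-level split, as the Chars-level one
theorem pv_split_words (s : String) :
    ∃ ws : List String, PySem.Str.split? s "." = some ws ∧
      ws.map String.toList = PySem.Chars.splitOn s.toList ['.'] := by
  have h := PySem.Str.split?_map s "."
  rw [show ("." : String).toList = ['.'] from rfl] at h
  unfold PySem.Chars.split? at h
  simp only [List.isEmpty_cons, if_false, Bool.false_eq_true] at h
  cases hs : PySem.Str.split? s "." with
  | none => rw [hs] at h; simp at h
  | some ws =>
    rw [hs] at h
    simp only [Option.map_some, Option.some.injEq] at h
    exact ⟨ws, rfl, h⟩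

-- B's slice is a take
theorem pv_alt_take (s : String) :
    get_module_combinations_alt s =
      (List.range (((PySem.Str.split? s ".").getD []).length)).map (fun i =>
        PySem.Str.join "." (((PySem.Str.split? s ".").getD []).take (i + 1))) := by
  unfold get_module_combinations_alt
  apply List.map_congr_left
  intro i _
  have : ((i : Int) + 1) = ((i + 1 : Nat) : Int) := by push_cast; ring
  rw [this, PySem.List.slice_to_natCast]

-- ===== VERDICT (by name: the statements are the Claim_ definitions above) =====
theorem get_module_combinations_spec : Claim_unchanged_get_module_combinations := by
  intro s _ hD
  obtain ⟨ws, hws, hmap⟩ := pv_split_words s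
  rw [pv_alt_take]
  unfold get_module_combinations
  simp only [hws, Option.getD_some]
  rw [pv_foldl_combos, List.nil_append]
  cases hl : s.toList with
  | nil =>
    have hsplit : PySem.Chars.splitOn s.toList ['.'] = [[]] := by rw [hl]; exact pv_splitOn_nil
    rw [hsplit] at hmap
    have hws1 : ws = [""] := by
      cases ws with
      | nil => simp at hmap
      | cons w tl =>
        cases tl with
        | nil =>
          simp only [List.map_cons, List.map_nil, List.cons.injEq] at hmap
          rw [show w = "" from String.toList_inj.mp (by simp [hmap.1])]
        | cons _ _ => simp at hmap
    subst hws1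
    simp [pvCombos, List.range_succ_eq_map, pv_join_singleton]
  | cons c rest =>
    have hc : c ≠ '.' := by
      intro h
      apply hD
      unfold D_get_module_combinations
      have : PySem.Str.startswith s "." = PySem.Chars.startswith s.toList ['.'] := by
        simp [PySem.Str.startswith_eq]
      rw [this, hl, h]
      simp [PySem.Chars.startswith, List.isPrefixOf]
    obtain ⟨t, ts, hsplit⟩ := pv_splitOn_head_ne c rest hc
    rw [hl, hsplit] at hmap
    cases ws with
    | nil => simp at hmap
    | cons w tl =>
      have hw : w ≠ "" := by
        intro h
        rw [h] at hmap
        simp at hmap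
      have := pv_combos_ne tl w hw
      calc pvCombos "" (w :: tl) = w :: pvCombos w tl := by simp [pvCombos]
        _ = _ := by rw [this]; simp

theorem get_module_combinations_changed : Claim_changed_get_module_combinations := by
  unfold Claim_changed_get_module_combinations; decide

theorem get_module_combinations_tight : Claim_exact_get_module_combinations := by
  intro s _ hD heq
  unfold D_get_module_combinations at hD
  obtain ⟨ws, hws, hmap⟩ := pv_split_words s
  have hl : ∃ rest, s.toList = '.' :: rest := by
    rw [PySem.Str.startswith_eq] at hD
    rw [show ("." : String).toList = ['.'] from rfl] at hD
    unfold PySem.Chars.startswith at hD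
    cases hsl : s.toList with
    | nil => rw [hsl] at hD; simp [List.isPrefixOf] at hD
    | cons c rest =>
      rw [hsl] at hD
      simp [List.isPrefixOf] at hD
      exact ⟨rest, by rw [← hD]⟩
  obtain ⟨rest, hl⟩ := hl
  have hsplit := pv_splitOn_cons_dot rest
  rw [hl, hsplit] at hmap
  -- ws = "" :: w1 :: tl
  cases ws with
  | nil => simp at hmap
  | cons w0 tl0 =>
    simp only [List.map_cons, List.cons.injEq] at hmap
    have hw0 : w0 = "" := String.toList_inj.mp (by simp [hmap.1])
    cases tl0 with
    | nil =>
      have := pv_splitOn_ne_nil rest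
      rw [← hmap.2] at this
      simp at this
    | cons w1 tl =>
      -- LHS index 1 is w1, RHS index 1 is "." ++ w1
      have hA : (get_module_combinations s)[1]? = some w1 := by
        unfold get_module_combinations
        simp only [hws, Option.getD_some]
        rw [pv_foldl_combos, List.nil_append, hw0]
        simp [pvCombos]
      have hB : (get_module_combinations_alt s)[1]? = some ("." ++ w1) := by
        rw [pv_alt_take]
        simp only [hws, Option.getD_some]
        rw [List.getElem?_map]
        have hlen : (1 : Nat) < (w0 :: w1 :: tl).length := by simp
        rw [List.getElem?_range (by simp)]
        simp only [Option.map_some, Option.some.injEq]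
        rw [hw0]
        simp only [List.take_succ_cons, List.take_succ_cons, List.take_zero]
        rw [pv_join_cons2, pv_join_singleton]
        simp
      rw [heq, hB] at hA
      have := congrArg (fun o => (Option.map String.toList o)) hA
      simp at this
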